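-- pv_equiv track=rewrite | github.com/RJY66/COMP9318-20T1 | 9318Lab2.py | single_line_opt
-- ===== SOURCE A (Python) =====
-- def single_line_opt(row, col):
--     dims = row[:-1][1-col:]
--     dim = len(dims)
--     result = []
--     for i in range(0, 2 ** dim):
--         new_row = list(row)
--         for j in range(0, dim):
--             gap = 2 ** j
--             if i % (2 * gap) > gap - 1:
--                 new_row[len(new_row) - j - 2] = 'ALL'
--         result.append(new_row)
--     return result
-- ===== SOURCE B (Python) =====
-- def single_line_opt(row, col):
--     dim = len(row[:-1][1 - col:])
--     result = [list(row)]
--     for p in range(len(row) - 1 - dim, len(row) - 1):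
--         nxt = []
--         for r in result:
--             nxt.append(r)
--             r2 = list(r)
--             r2[p] = 'ALL'
--             nxt.append(r2)
--         result = nxt
--     return result
-- ===== Notes on version B (the rewrite author's own statement) =====
-- stated objective: alternative
-- what changed: A enumerates i in range(2**dim) and decodes i's bits with modulus tests to decide which positions become 'ALL'; B never touches bit arithmetic: it folds over the affected positions, doubling the result list at each position (keep-row followed by row-with-'ALL'), which yields the identical order.
import Mathlib
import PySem

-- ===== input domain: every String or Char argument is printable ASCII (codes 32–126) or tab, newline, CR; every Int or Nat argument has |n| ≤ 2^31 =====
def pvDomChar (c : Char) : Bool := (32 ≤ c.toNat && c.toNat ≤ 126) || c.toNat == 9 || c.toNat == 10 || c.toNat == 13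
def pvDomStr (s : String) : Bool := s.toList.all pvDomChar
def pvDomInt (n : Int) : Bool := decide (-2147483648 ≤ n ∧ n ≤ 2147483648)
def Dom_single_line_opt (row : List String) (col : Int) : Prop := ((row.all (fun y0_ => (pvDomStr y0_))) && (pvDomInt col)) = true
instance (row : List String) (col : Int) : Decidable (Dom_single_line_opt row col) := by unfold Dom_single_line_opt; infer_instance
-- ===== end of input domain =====

-- B replaces A's 2^dim-iteration bit-decoding loop by an incremental doubling fold over the
-- affected positions (alternative decomposition; same output order).

-- ===== PORT A =====
-- The Python index len(new_row)-j-2 is always ≥ 0 here (dim ≤ len(row)-1), so Nat subtraction is exact.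
def single_line_opt (row : List String) (col : Int) : List (List String) :=
  let dims := PySem.List.slice (PySem.List.slice row none (some (-1))) (some (1 - col)) none
  let dim := dims.length
  (PySem.List.pyRange 0 ((2:Int)^dim) 1).foldl (fun result i =>
    let new_row := (PySem.List.pyRange 0 (dim:Int) 1).foldl (fun nr j =>
      let gap : Int := (2:Int)^j.toNat
      if PySem.Int.mod i (2*gap) > gap - 1 then nr.set (nr.length - j.toNat - 2) "ALL" else nr) row
    result ++ [new_row]) []

-- ===== PORT B =====
def single_line_opt_alt (row : List String) (col : Int) : List (List String) :=
  let dim := (PySem.List.slice (PySem.List.slice row none (some (-1))) (some (1 - col)) none).length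
  (PySem.List.pyRange ((row.length : Int) - 1 - dim) ((row.length : Int) - 1) 1).foldl
    (fun result p =>
      result.foldl (fun nxt r => nxt ++ [r, r.set p.toNat "ALL"]) []) [row]

-- ===== PRECONDITION & SPEC =====
def Spec_single_line_opt (row : List String) (col : Int) (out : List (List String)) : Prop := out = single_line_opt_alt row col
instance (row : List String) (col : Int) (out : List (List String)) : Decidable (Spec_single_line_opt row col out) := by unfold Spec_single_line_opt; infer_instance

-- ===== CLAIM (what is proved, stated in full; the proofs are below) =====
def Claim_equal_single_line_opt : Prop := ∀ (row : List String) (col : Int), Dom_single_line_opt row col → Spec_single_line_opt row col (single_line_opt row col)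

-- ===== LEMMAS AND PROOFS =====

-- fixed-length version of A's inner loop (nr.length replaced by n)
def innerF (n : Nat) (d : Nat) (i : Int) (r : List String) : List String :=
  (PySem.List.pyRange 0 (d : Int) 1).foldl (fun nr j =>
    if PySem.Int.mod i (2*((2:Int)^j.toNat)) > (2:Int)^j.toNat - 1
    then nr.set (n - j.toNat - 2) "ALL" else nr) r

-- B's doubling fold
def G (ps : List Int) (res : List (List String)) : List (List String) :=
  ps.foldl (fun res p => res.flatMap (fun r => [r, r.set p.toNat "ALL"])) res

def dimE (row : List String) (col : Int) : Nat :=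
  (PySem.List.slice (PySem.List.slice row none (some (-1))) (some (1 - col)) none).length

theorem dimE_le (row : List String) (col : Int) : dimE row col ≤ row.length - 1 := by
  unfold dimE
  rw [PySem.List.slice_to_neg_one, PySem.List.slice_some_none]
  simp [List.length_drop]

-- A's inner loop computes innerF (the list length is invariant under set)
theorem innerA_eq_innerF (l : List Int) (i : Int) (n : Nat) :
    ∀ (r : List String), r.length = n →
    l.foldl (fun nr j =>
      if PySem.Int.mod i (2*((2:Int)^j.toNat)) > (2:Int)^j.toNat - 1
      then nr.set (nr.length - j.toNat - 2) "ALL" else nr) r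
    = l.foldl (fun nr j =>
      if PySem.Int.mod i (2*((2:Int)^j.toNat)) > (2:Int)^j.toNat - 1
      then nr.set (n - j.toNat - 2) "ALL" else nr) r := by
  induction l with
  | nil => intro r h; rfl
  | cons j t ih =>
    intro r h
    rw [List.foldl_cons, List.foldl_cons]
    by_cases hc : PySem.Int.mod i (2*((2:Int)^j.toNat)) > (2:Int)^j.toNat - 1
    · rw [if_pos hc, if_pos hc, h, ih (r.set (n - j.toNat - 2) "ALL") (by simp [h])]
    · rw [if_neg hc, if_neg hc, ih r h]

theorem A_eq_map (row : List String) (col : Int) :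
    single_line_opt row col
    = (PySem.List.pyRange 0 ((2:Int)^(dimE row col)) 1).map
        (fun i => innerF row.length (dimE row col) i row) := by
  unfold single_line_opt dimE
  rw [PySem.List.foldl_append_singleton_eq_map, List.nil_append]
  apply List.map_congr_left
  intro i _
  exact innerA_eq_innerF _ i row.length row rfl

theorem B_eq_G (row : List String) (col : Int) :
    single_line_opt_alt row col
    = G (PySem.List.pyRange ((row.length : Int) - 1 - (dimE row col)) ((row.length : Int) - 1) 1) [row] := by
  unfold single_line_opt_alt dimE G
  simp only [PySem.List.foldl_append_eq_flatMap, List.nil_append]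

theorem G_append (ps : List Int) (a b : List (List String)) :
    G ps (a ++ b) = G ps a ++ G ps b := by
  induction ps generalizing a b with
  | nil => rfl
  | cons p t ih =>
    unfold G
    rw [List.foldl_cons, List.foldl_cons, List.flatMap_append]
    exact ih _ _

theorem innerF_succ (n d : Nat) (i : Int) (r : List String) :
    innerF n (d+1) i r
    = if PySem.Int.mod i (2*((2:Int)^d)) > (2:Int)^d - 1
      then (innerF n d i r).set (n - d - 2) "ALL" else innerF n d i r := by
  unfold innerF
  have h1 : ((d+1 : Nat) : Int) = (d : Int) + 1 := by push_cast; ring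
  rw [h1, PySem.List.pyRange_one_succ_right (by positivity), List.foldl_append]
  simp

theorem mod_low (d j : Nat) (k : Int) (hj : j < d) :
    PySem.Int.mod ((2:Int)^d + k) (2*((2:Int)^j)) = PySem.Int.mod k (2*((2:Int)^j)) := by
  have hpos : (0:Int) < 2*((2:Int)^j) := by positivity
  rw [PySem.Int.mod_eq_emod_of_pos hpos, PySem.Int.mod_eq_emod_of_pos hpos]
  have hdvd : (2*((2:Int)^j)) ∣ (2:Int)^d := by
    have : (2:Int)*2^j = 2^(j+1) := by ring
    rw [this]
    exact pow_dvd_pow 2 (by omega)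
  rw [Int.add_emod, Int.emod_eq_zero_of_dvd hdvd]
  simp

-- shifting i by 2^d does not change the low d bits
theorem innerF_shift (n d : Nat) (k : Int) (r : List String) :
    innerF n d ((2:Int)^d + k) r = innerF n d k r := by
  unfold innerF
  apply PySem.List.foldl_congr_mem
  intro nr j hj
  have hjd : j.toNat < d := by
    rcases (PySem.List.mem_pyRange_one).1 hj with ⟨h0, h1⟩
    omega
  rw [mod_low d j.toNat k hjd]

-- sets inside innerF commute past a prior set at the top position
theorem innerF_set_comm (n d m : Nat) (i : Int) (r : List String)
    (hm : ∀ j : Nat, j < d → n - j - 2 ≠ m) :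
    innerF n d i (r.set m "ALL") = (innerF n d i r).set m "ALL" := by
  unfold innerF
  have : ∀ l : List Int, (∀ j ∈ l, j.toNat < d) → ∀ r : List String,
      l.foldl (fun nr j =>
        if PySem.Int.mod i (2*((2:Int)^j.toNat)) > (2:Int)^j.toNat - 1
        then nr.set (n - j.toNat - 2) "ALL" else nr) (r.set m "ALL")
      = (l.foldl (fun nr j =>
        if PySem.Int.mod i (2*((2:Int)^j.toNat)) > (2:Int)^j.toNat - 1
        then nr.set (n - j.toNat - 2) "ALL" else nr) r).set m "ALL" := by
    intro l
    induction l with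
    | nil => intro _ r; rfl
    | cons j t ih =>
      intro hl r
      rw [List.foldl_cons, List.foldl_cons]
      by_cases hc : PySem.Int.mod i (2*((2:Int)^j.toNat)) > (2:Int)^j.toNat - 1
      · rw [if_pos hc, if_pos hc,
          List.set_comm "ALL" "ALL" (Ne.symm (hm j.toNat (hl j List.mem_cons_self))),
          ih (fun x hx => hl x (List.mem_cons_of_mem _ hx))]
      · rw [if_neg hc, if_neg hc, ih (fun x hx => hl x (List.mem_cons_of_mem _ hx))]
  apply this
  intro j hj
  rcases (PySem.List.mem_pyRange_one).1 hj with ⟨h0, h1⟩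
  omega

theorem main_lemma (d : Nat) : ∀ (n : Nat) (r : List String), r.length = n → d ≤ n - 1 →
    (PySem.List.pyRange 0 ((2:Int)^d) 1).map (fun i => innerF n d i r)
    = G (PySem.List.pyRange ((n : Int) - 1 - (d : Int)) ((n : Int) - 1) 1) [r] := by
  induction d with
  | zero =>
    intro n r hr hd
    rw [show ((2:Int)^0) = 0 + 1 by norm_num, PySem.List.pyRange_one_singleton]
    simp only [Nat.cast_zero, sub_zero]
    rw [PySem.List.pyRange_one_eq_nil (le_refl _)]
    unfold G innerF
    rw [Nat.cast_zero, PySem.List.pyRange_one_eq_nil (le_refl _)]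
    rfl
  | succ d ih =>
    intro n r hr hd
    have hn : d + 2 ≤ n := by omega
    have hpow : (0:Int) < 2^d := by positivity
    have hpow2 : (2:Int)^(d+1) = 2^d + 2^d := by rw [pow_succ]; ring
    -- split A's index range at 2^d
    rw [PySem.List.pyRange_one_append 0 ((2:Int)^d) ((2:Int)^(d+1)) (by positivity)
        (by rw [hpow2]; linarith), List.map_append]
    -- first half: the top bit is 0
    have hfirst : (PySem.List.pyRange 0 ((2:Int)^d) 1).map (fun i => innerF n (d+1) i r)
        = (PySem.List.pyRange 0 ((2:Int)^d) 1).map (fun i => innerF n d i r) := by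
      apply List.map_congr_left
      intro i hi
      rcases PySem.List.mem_pyRange_one.mp hi with ⟨h0, h1⟩
      rw [innerF_succ, if_neg]
      rw [PySem.Int.mod_eq_emod_of_pos (by positivity), Int.emod_eq_of_lt h0 (by linarith)]
      intro hgt
      simp only [gt_iff_lt] at hgt
      linarith
    -- second half: reindex by 2^d; the top bit is 1
    have hsecond : PySem.List.pyRange ((2:Int)^d) ((2:Int)^(d+1)) 1
        = (PySem.List.pyRange 0 ((2:Int)^d) 1).map (fun k => (2:Int)^d + k) := by
      rw [PySem.List.pyRange_one, PySem.List.pyRange_one,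
          show ((2:Int)^(d+1) - 2^d) = 2^d - 0 by rw [pow_succ]; ring, List.map_map]
      simp [Function.comp]
    rw [hfirst, hsecond, List.map_map]
    have hmne : ∀ j : Nat, j < d → n - j - 2 ≠ n - d - 2 := by intro j hj; omega
    have hsec2 : ∀ i ∈ PySem.List.pyRange 0 ((2:Int)^d) 1,
        ((fun i => innerF n (d+1) i r) ∘ (fun k => (2:Int)^d + k)) i
        = innerF n d i (r.set (n - d - 2) "ALL") := by
      intro i hi
      rcases PySem.List.mem_pyRange_one.mp hi with ⟨h0, h1⟩
      simp only [Function.comp_apply]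
      rw [innerF_succ, if_pos, innerF_shift, ← innerF_set_comm n d (n - d - 2) i r hmne]
      rw [PySem.Int.mod_eq_emod_of_pos (by positivity),
          Int.emod_eq_of_lt (by linarith) (by linarith)]
      simp only [gt_iff_lt]
      linarith
    rw [List.map_congr_left hsec2]
    -- B's side: peel the first position n-d-2 and distribute the doubling over the append
    rw [show (((d+1 : Nat)) : Int) = (d : Int) + 1 by push_cast; ring,
        PySem.List.pyRange_one_cons (a := (n:Int) - 1 - ((d:Int) + 1)) (b := (n:Int) - 1) (by omega)]
    have hG : G (((n:Int) - 1 - ((d:Int) + 1)) :: PySem.List.pyRange ((n:Int) - 1 - ((d:Int) + 1) + 1) ((n:Int) - 1) 1) [r]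
        = G (PySem.List.pyRange ((n:Int) - 1 - (d:Int)) ((n:Int) - 1) 1) [r]
          ++ G (PySem.List.pyRange ((n:Int) - 1 - (d:Int)) ((n:Int) - 1) 1) [r.set (n - d - 2) "ALL"] := by
      have hp : ((n:Int) - 1 - ((d:Int) + 1)).toNat = n - d - 2 := by omega
      have ht : ((n:Int) - 1 - ((d:Int) + 1)) + 1 = (n:Int) - 1 - (d:Int) := by ring
      have hcons : G (((n:Int) - 1 - ((d:Int) + 1)) :: PySem.List.pyRange ((n:Int) - 1 - ((d:Int) + 1) + 1) ((n:Int) - 1) 1) [r]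
          = G (PySem.List.pyRange ((n:Int) - 1 - ((d:Int) + 1) + 1) ((n:Int) - 1) 1)
              ([r] ++ [r.set ((n:Int) - 1 - ((d:Int) + 1)).toNat "ALL"]) := rfl
      rw [hcons, hp, ht, G_append]
    rw [hG, ih n r hr (by omega), ih n (r.set (n - d - 2) "ALL") (by simp [hr]) (by omega)]
theorem single_line_opt_spec : Claim_equal_single_line_opt := by
  intro row col _
  unfold Spec_single_line_opt
  rw [A_eq_map, B_eq_G]
  exact main_lemma (dimE row col) row.length row rfl (dimE_le row col)
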